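-- pv_equiv track=rewrite | github.com/lflaherty/evfirmware-vcu | tools/create_markdown_toc.py | header_text_to_link
-- ===== SOURCE A (Python) =====
-- def header_text_to_link(line: str):
--     REPLACE_LIST = {
--         ' ': '-',
--         '/': '-',
--         '?': '-',
--         '&': '-',
--     }
--     link = line.lstrip().rstrip()
--     for key,val in REPLACE_LIST.items():
--         link = link.replace(key, val)
--     return link
-- ===== SOURCE B (Python) =====
-- REPLACE_LIST = {
--     ' ': '-',
--     '/': '-',
--     '?': '-',
--     '&': '-',
-- }
--
-- def header_text_to_link(line: str):
--     return ''.join(REPLACE_LIST.get(c, c) for c in line.strip())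
-- ===== Notes on version B (the rewrite author's own statement) =====
-- stated objective: idiomatic
-- what changed: Replaces A's strip plus four successive full-string .replace passes with one single-pass character translation: each character of line.strip() is mapped through the replacement dict used as a per-character lookup table and joined once.
import Mathlib
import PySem

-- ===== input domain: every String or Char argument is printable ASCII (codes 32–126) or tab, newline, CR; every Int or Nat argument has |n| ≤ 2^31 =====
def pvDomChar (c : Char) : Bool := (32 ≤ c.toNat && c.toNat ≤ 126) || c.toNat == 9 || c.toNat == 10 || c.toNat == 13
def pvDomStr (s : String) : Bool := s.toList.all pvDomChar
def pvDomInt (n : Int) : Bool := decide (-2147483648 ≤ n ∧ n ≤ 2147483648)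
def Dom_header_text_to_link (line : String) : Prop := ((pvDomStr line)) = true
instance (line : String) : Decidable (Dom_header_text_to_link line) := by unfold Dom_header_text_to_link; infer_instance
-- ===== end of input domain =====

-- B replaces A's strip + four successive full-string .replace passes with a single
-- character-by-character translation pass over line.strip() (idiomatic; same output).

-- ===== PORT A =====
-- the literal REPLACE_LIST dict of A (string keys/values, insertion order)
def pvReplaceListA : PySem.Dict String String :=
  ⟨[(" ", "-"), ("/", "-"), ("?", "-"), ("&", "-")]⟩

def header_text_to_link (line : String) : String :=
  let link := PySem.Str.rstrip (PySem.Str.lstrip line)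
  pvReplaceListA.items.foldl (fun link kv => PySem.Str.replace link kv.1 kv.2) link

-- ===== PORT B =====
-- B iterates over the characters of line.strip(); the dict keys/values are the
-- single characters, looked up per character with .get(c, c)
def pvReplaceListB : PySem.Dict Char Char :=
  ⟨[(' ', '-'), ('/', '-'), ('?', '-'), ('&', '-')]⟩

def header_text_to_link_alt (line : String) : String :=
  String.ofList ((PySem.Str.strip line).toList.map (fun c => pvReplaceListB.getD c c))

-- ===== PRECONDITION & SPEC =====
def Spec_header_text_to_link (line : String) (out : String) : Prop := out = header_text_to_link_alt line
instance (line : String) (out : String) : Decidable (Spec_header_text_to_link line out) := by unfold Spec_header_text_to_link; infer_instance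

-- ===== CLAIM (what is proved, stated in full; the proofs are below) =====
def Claim_equal_header_text_to_link : Prop := ∀ (line : String), Dom_header_text_to_link line → Spec_header_text_to_link line (header_text_to_link line)

-- ===== LEMMAS AND PROOFS =====

-- replace with a single-character pattern is a per-character map
theorem replace_go_single (c d : Char) :
    ∀ (fuel : Nat) (l acc : List Char), l.length ≤ fuel →
      PySem.Chars.replace.go [c] [d] fuel l acc
        = acc.reverse ++ l.map (fun x => if x = c then d else x) := by
  intro fuel
  induction fuel with
  | zero =>
    intro l acc h
    have : l = [] := List.length_eq_zero_iff.mp (Nat.le_zero.mp h)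
    subst this
    simp [PySem.Chars.replace.go]
  | succ n ih =>
    intro l acc h
    cases l with
    | nil => simp [PySem.Chars.replace.go]
    | cons x t =>
      simp only [PySem.Chars.replace.go]
      by_cases hx : x = c
      · subst hx
        have hpre : List.isPrefixOf [x] (x :: t) = true := by
          simp [List.isPrefixOf]
        rw [if_pos hpre]
        have : List.drop (List.length [x]) (x :: t) = t := by simp
        rw [this, ih t _ (by simpa using Nat.le_of_succ_le_succ h)]
        simp
      · have hpre : List.isPrefixOf [c] (x :: t) = false := by
          simp [List.isPrefixOf]
          intro hc; exact absurd hc.symm hx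
        rw [if_neg (by simp [hpre])]
        rw [ih t _ (by simpa using Nat.le_of_succ_le_succ h)]
        simp [hx]

theorem replace_single (c d : Char) (cs : List Char) :
    PySem.Chars.replace cs [c] [d] = cs.map (fun x => if x = c then d else x) := by
  simp only [PySem.Chars.replace, List.isEmpty_cons]
  simpa using replace_go_single c d cs.length cs [] (le_refl _)

theorem table_lookup (x : Char) :
    pvReplaceListB.getD x x
      = (if (if (if (if x = ' ' then '-' else x) = '/' then '-'
               else (if x = ' ' then '-' else x)) = '?' then '-'
             else (if (if x = ' ' then '-' else x) = '/' then '-'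
               else (if x = ' ' then '-' else x))) = '&' then '-'
           else (if (if (if x = ' ' then '-' else x) = '/' then '-'
               else (if x = ' ' then '-' else x)) = '?' then '-'
             else (if (if x = ' ' then '-' else x) = '/' then '-'
               else (if x = ' ' then '-' else x)))) := by
  by_cases h1 : x = ' '
  · subst h1; decide
  by_cases h2 : x = '/'
  · subst h2; decide
  by_cases h3 : x = '?'
  · subst h3; decide
  by_cases h4 : x = '&'
  · subst h4; decide
  have e1 : (' ' == x) = false := by simp [Ne.symm h1]
  have e2 : ('/' == x) = false := by simp [Ne.symm h2]
  have e3 : ('?' == x) = false := by simp [Ne.symm h3]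
  have e4 : ('&' == x) = false := by simp [Ne.symm h4]
  simp [PySem.Dict.getD, PySem.Dict.get?, pvReplaceListB, e1, e2, e3, e4, h1, h2, h3, h4]

-- ===== VERDICT (by name: the statement is the Claim_ definition above) =====
theorem header_text_to_link_spec : Claim_equal_header_text_to_link := by
  intro line _
  unfold Spec_header_text_to_link header_text_to_link header_text_to_link_alt
  apply String.toList_inj.mp
  simp only [pvReplaceListA, List.foldl]
  simp only [PySem.Str.toList_replace, PySem.Str.toList_strip, PySem.Str.toList_rstrip,
    PySem.Str.toList_lstrip]
  have hstrip : PySem.Chars.strip line.toList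
      = PySem.Chars.rstrip (PySem.Chars.lstrip line.toList) := rfl
  rw [hstrip]
  generalize PySem.Chars.rstrip (PySem.Chars.lstrip line.toList) = cs
  have h1 := replace_single ' ' '-'
  have h2 := replace_single '/' '-'
  have h3 := replace_single '?' '-'
  have h4 := replace_single '&' '-'
  simp only [show (" " : String).toList = [' '] from rfl,
    show ("-" : String).toList = ['-'] from rfl,
    show ("/" : String).toList = ['/'] from rfl,
    show ("?" : String).toList = ['?'] from rfl,
    show ("&" : String).toList = ['&'] from rfl, h1, h2, h3, h4,
    List.map_map, String.toList_ofList]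
  apply List.map_congr_left
  intro x _
  simp only [Function.comp]
  exact (table_lookup x).symm
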